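-- pv_equiv track=rewrite | github.com/home-zhaoran2017/machine_learning | sequence_pattern_mining/sequence_pattern_mining.py | gen_candidate
-- ===== SOURCE A (Python) =====
-- import operator
--
-- def hash_item(item):
--     item=["%03d"%i for i in item]
--     return ''.join(item)
--
-- def gen_candidate(Lk,k):
--     Ck_new = []
--     for item1 in Lk:
--         for item2 in Lk:
--             s1 = item1[1:]
--             s2 = item2[:-1]
--             if operator.eq(s1,s2):
--                 Ck_new.append(item1+[item2[-1]])
--
--     keys = [hash_item(C) for C in Ck_new]
--     values = [0] * len(Ck_new)
--     Hk_new=dict(zip(keys,values))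
--
--     return Ck_new, Hk_new
-- ===== SOURCE B (Python) =====
-- def hash_item(item):
--     item = ["%03d" % i for i in item]
--     return ''.join(item)
--
-- def gen_candidate(Lk, k):
--     # index every sequence by its prefix (all but last element); join by dict lookup
--     pairs = [(tuple(item[:-1]), item[-1]) for item in Lk]
--     groups = {}
--     for key, last in pairs:
--         groups.setdefault(key, []).append(last)
--     Ck_new = [item1 + [last] for item1 in Lk
--               for last in groups.get(tuple(item1[1:]), [])]
--     keys = [hash_item(C) for C in Ck_new]
--     Hk_new = dict(zip(keys, [0] * len(Ck_new)))
--     return Ck_new, Hk_new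
-- ===== Notes on version B (the rewrite author's own statement) =====
-- stated objective: alternative
-- what changed: Replaces the all-pairs prefix/suffix comparison by a dict that groups each sequence's last element under its (k-1)-prefix, so each item1 is joined via one dict lookup instead of an inner scan over Lk.
import Mathlib
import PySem

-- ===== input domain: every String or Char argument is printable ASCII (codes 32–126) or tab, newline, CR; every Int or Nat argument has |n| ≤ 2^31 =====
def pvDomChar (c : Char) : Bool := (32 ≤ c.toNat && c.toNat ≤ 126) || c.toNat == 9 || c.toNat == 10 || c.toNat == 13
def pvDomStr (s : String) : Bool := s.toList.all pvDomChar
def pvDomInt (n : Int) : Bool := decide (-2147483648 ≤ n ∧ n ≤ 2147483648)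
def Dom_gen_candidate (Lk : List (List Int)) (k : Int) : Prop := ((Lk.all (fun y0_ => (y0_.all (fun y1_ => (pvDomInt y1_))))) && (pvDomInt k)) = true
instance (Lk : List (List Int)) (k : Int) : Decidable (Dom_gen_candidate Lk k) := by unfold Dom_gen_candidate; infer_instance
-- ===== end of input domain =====

-- B joins via a dict that groups last elements under their (k-1)-prefix instead of
-- A's all-pairs scan: one dict lookup per item1 (objective: alternative algorithm).

-- shared module-level helper of both Pythons: hash_item
-- "%03d" % i : zero-pad to width 3 with the sign outside the zeros (exact for all ints)
def pvFmt03 (i : Int) : String :=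
  if i < 0 then
    let digits := PySem.Int.toStr (-i)
    "-" ++ String.mk (List.replicate (2 - digits.toList.length) '0') ++ digits
  else
    let digits := PySem.Int.toStr i
    String.mk (List.replicate (3 - digits.toList.length) '0') ++ digits

def pvHashItem (item : List Int) : String :=
  (item.map pvFmt03).foldl (· ++ ·) ""   -- ''.join(["%03d" % i for i in item])

-- dict(zip(keys, values)) returned as an association list (insertion order, overwrite)
def pvDictZip (keys : List String) (values : List Int) : List (String × Int) :=
  ((keys.zip values).foldl (fun d p => d.insert p.1 p.2) PySem.Dict.empty).items

-- ===== PORT A =====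
def gen_candidate (Lk : List (List Int)) (k : Int) : List (List Int) × (List (String × Int)) :=
  let Ck_new : List (List Int) :=
    Lk.foldl (fun acc item1 =>
      Lk.foldl (fun acc item2 =>
        let s1 := PySem.List.slice item1 (some 1) none        -- item1[1:]
        let s2 := PySem.List.slice item2 none (some (-1))     -- item2[:-1]
        if s1 = s2 then
          match PySem.List.pyGet? item2 (-1) with             -- item2[-1]; none = IndexError (excluded by Pre_)
          | some v => acc ++ [item1 ++ [v]]
          | none => acc
        else acc) acc) []
  let keys := Ck_new.map pvHashItem
  let values := List.replicate Ck_new.length (0 : Int)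
  (Ck_new, pvDictZip keys values)

-- ===== PORT B =====
def gen_candidate_alt (Lk : List (List Int)) (k : Int) : List (List Int) × (List (String × Int)) :=
  -- pairs = [(tuple(item[:-1]), item[-1]) for item in Lk]; item[-1] raises on [] (excluded by Pre_)
  let pairs : List (List Int × Int) :=
    Lk.filterMap (fun item =>
      (PySem.List.pyGet? item (-1)).map (fun v => (PySem.List.slice item none (some (-1)), v)))
  -- groups.setdefault(key, []).append(last)
  let groups : PySem.Dict (List Int) (List Int) :=
    pairs.foldl (fun d p => d.modify p.1 [] (· ++ [p.2])) PySem.Dict.empty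
  -- Ck_new = [item1 + [last] for item1 in Lk for last in groups.get(tuple(item1[1:]), [])]
  let Ck_new : List (List Int) :=
    Lk.flatMap (fun item1 =>
      (groups.getD (PySem.List.slice item1 (some 1) none) []).map (fun v => item1 ++ [v]))
  let keys := Ck_new.map pvHashItem
  let values := List.replicate Ck_new.length (0 : Int)
  (Ck_new, pvDictZip keys values)

-- ===== PRECONDITION & SPEC =====
-- Pre_ excludes exactly the inputs where Python A raises IndexError: some sequence in Lk
-- is empty (then the pair (item1=[], item2=[]) matches and item2[-1] raises).
def Pre_gen_candidate (Lk : List (List Int)) (k : Int) : Prop := ¬ ([] ∈ Lk)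
instance (Lk : List (List Int)) (k : Int) : Decidable (Pre_gen_candidate Lk k) := by unfold Pre_gen_candidate; infer_instance
def pvWitness_gen_candidate : List (List Int) × Int := ([[1, 2], [2, 3]], 2)

def Spec_gen_candidate (Lk : List (List Int)) (k : Int) (out : List (List Int) × (List (String × Int))) : Prop := out = gen_candidate_alt Lk k
instance (Lk : List (List Int)) (k : Int) (out : List (List Int) × (List (String × Int))) : Decidable (Spec_gen_candidate Lk k out) := by unfold Spec_gen_candidate; infer_instance

-- ===== CLAIM (what is proved, stated in full; the proofs are below) =====
def Claim_equal_gen_candidate : Prop := ∀ (Lk : List (List Int)) (k : Int), Dom_gen_candidate Lk k → Pre_gen_candidate Lk k → Spec_gen_candidate Lk k (gen_candidate Lk k)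

-- ===== LEMMAS AND PROOFS =====

-- B's grouped lookup for a given key equals the filtered pair list
lemma pv_groups_getD (pairs : List (List Int × Int)) (c : List Int) :
    ((pairs.foldl (fun d p => d.modify p.1 [] (· ++ [p.2])) PySem.Dict.empty).getD c [])
      = (pairs.filter (fun p => p.1 == c)).map (·.2) := by
  have := PySem.Dict.getD_foldl_modify_append (l := pairs) (d := PySem.Dict.empty) (c := c)
  simpa using this

-- A's inner scan over Lk for a fixed item1 appends exactly the grouped matches
lemma pv_inner_eq (item1 : List Int) (L : List (List Int)) (acc : List (List Int)) :
    L.foldl (fun acc item2 =>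
        if item1.tail = item2.dropLast then
          match PySem.List.pyGet? item2 (-1) with
          | some v => acc ++ [item1 ++ [v]]
          | none => acc
        else acc) acc
      = acc ++ ((L.filterMap (fun item =>
          (PySem.List.pyGet? item (-1)).map (fun v => (item.dropLast, v)))).filter
            (fun p => p.1 == item1.tail)).map (fun p => item1 ++ [p.2]) := by
  induction L generalizing acc with
  | nil => simp
  | cons it2 rest ih =>
    simp only [List.foldl_cons, List.filterMap_cons]
    cases h : PySem.List.pyGet? it2 (-1) with
    | none => simp [h, ih]
    | some v =>
      simp only [h, Option.map_some]
      by_cases hc : item1.tail = it2.dropLast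
      · rw [if_pos hc, ih, List.filter_cons_of_pos (by simp [hc])]
        simp
      · rw [if_neg hc, ih, List.filter_cons_of_neg (by simp [Ne.symm hc])]

theorem gen_candidate_eq_alt (Lk : List (List Int)) (k : Int) :
    gen_candidate Lk k = gen_candidate_alt Lk k := by
  unfold gen_candidate gen_candidate_alt
  simp only [PySem.List.slice_from_one, PySem.List.slice_to_neg_one]
  have hCk :
      Lk.foldl (fun acc item1 =>
        Lk.foldl (fun acc item2 =>
          if item1.tail = item2.dropLast then
            match PySem.List.pyGet? item2 (-1) with
            | some v => acc ++ [item1 ++ [v]]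
            | none => acc
          else acc) acc) []
      = Lk.flatMap (fun item1 =>
          (((Lk.filterMap (fun item =>
              (PySem.List.pyGet? item (-1)).map (fun v => (item.dropLast, v)))).foldl
                (fun d p => d.modify p.1 [] (· ++ [p.2])) PySem.Dict.empty).getD item1.tail []).map
            (fun v => item1 ++ [v])) := by
    have h1 : ∀ (acc : List (List Int)),
        Lk.foldl (fun acc item1 =>
          Lk.foldl (fun acc item2 =>
            if item1.tail = item2.dropLast then
              match PySem.List.pyGet? item2 (-1) with
              | some v => acc ++ [item1 ++ [v]]
              | none => acc
            else acc) acc) acc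
        = acc ++ Lk.flatMap (fun item1 =>
            ((Lk.filterMap (fun item =>
              (PySem.List.pyGet? item (-1)).map (fun v => (item.dropLast, v)))).filter
                (fun p => p.1 == item1.tail)).map (fun p => item1 ++ [p.2])) := by
      intro acc
      rw [← PySem.List.foldl_append_eq_flatMap]
      apply PySem.List.foldl_congr_mem
      intro a x _
      exact pv_inner_eq x Lk a
    rw [h1 []]
    simp only [List.nil_append]
    refine List.flatMap_congr ?_
    intro item1 _
    rw [pv_groups_getD, List.map_map]
    rfl
  rw [hCk]

-- ===== VERDICT (by name: the statement is the Claim_ definition above) =====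
theorem gen_candidate_spec : Claim_equal_gen_candidate := by
  intro Lk k _ _
  unfold Spec_gen_candidate
  exact gen_candidate_eq_alt Lk k
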